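-- pv_equiv track=rewrite | github.com/baysaa41/mmo | olympiad/management/commands/assign_national_award.py | _select_top
-- ===== SOURCE A (Python) =====
-- def _select_top(candidates, quota):
--     """
--     (score, uid, ...) жагсаалтаас оноо буурах дарааллаар quota тоог сонгоно.
--     Тэнцвэл тэнцсэн бүгдийг хасна.
--     Буцаана: сонгогдсон жагсаалт.
--     """
--     if not candidates:
--         return []
--     candidates = sorted(candidates, key=lambda x: x[0], reverse=True)
--     if len(candidates) <= quota:
--         return candidates
--     cutoff = candidates[quota - 1][0]
--     nxt    = candidates[quota][0]
--     if cutoff == nxt: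
--         return [c for c in candidates if c[0] > cutoff]
--     return candidates[:quota]
-- ===== SOURCE B (Python) =====
-- from itertools import groupby
--
-- def _select_top(candidates, quota):
--     ordered = sorted(candidates, key=lambda x: x[0], reverse=True)
--     result, count = [], 0
--     for _, grp in groupby(ordered, key=lambda x: x[0]):
--         group = list(grp)
--         if count + len(group) > quota:
--             break
--         result.extend(group)
--         count += len(group)
--     return result
-- ===== Notes on version B (the rewrite author's own statement) =====
-- stated objective: idiomatic
-- what changed: Replaces the cutoff/next-element index probing and the conditional filter-vs-slice with a single groupby-style pass over the sorted list that greedily takes whole score-groups while they fit in the quota, which drops straddling tie-groups and handles the empty and len<=quota cases without special branches.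
-- intended difference: For negative quota on a nonempty list (when fewer than len+quota+1 entries share the maximal score), A's negative indexing and slicing accidentally return a nonempty prefix of the sorted list (e.g. candidates[:-1]), while B returns [], the intended result of selecting at most a negative number of winners. — e.g. on _select_top([(3, 1), (2, 2)], -1): A returns [(3, 1)], B returns []
import Mathlib
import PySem

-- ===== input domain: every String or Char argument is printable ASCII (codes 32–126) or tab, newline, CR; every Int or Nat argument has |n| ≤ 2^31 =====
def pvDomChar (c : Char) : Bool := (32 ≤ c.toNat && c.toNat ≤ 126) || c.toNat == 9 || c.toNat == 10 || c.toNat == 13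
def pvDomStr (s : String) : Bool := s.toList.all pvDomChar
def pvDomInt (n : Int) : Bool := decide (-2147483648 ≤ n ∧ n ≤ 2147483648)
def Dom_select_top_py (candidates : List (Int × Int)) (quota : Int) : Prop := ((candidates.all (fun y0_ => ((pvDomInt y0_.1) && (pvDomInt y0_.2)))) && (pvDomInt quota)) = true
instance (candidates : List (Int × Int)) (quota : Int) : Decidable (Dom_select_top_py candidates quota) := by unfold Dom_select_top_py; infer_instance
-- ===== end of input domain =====

-- B replaces A's cutoff/next index probing and filter-vs-slice branches by one greedy pass over
-- whole score-groups of the sorted list (idiomatic groupby decomposition); for negative quota on a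
-- nonempty list B returns [] where A accidentally returns a slice (stated as D_ below).


-- ===== PORT A =====
def select_top_py (candidates : List (Int × Int)) (quota : Int) : List (Int × Int) :=
  if candidates = [] then []
  else
    let cs := PySem.List.sorted candidates (fun x => x.1) true
    if (cs.length : Int) ≤ quota then cs
    else
      match PySem.List.pyGet? cs (quota - 1), PySem.List.pyGet? cs quota with
      | some cc, some nc =>
          if cc.1 = nc.1 then cs.filter (fun c => decide (cc.1 < c.1))
          else PySem.List.slice cs none (some quota)
      | _, _ => []  -- IndexError (quota-1 or quota out of range); excluded by Pre_

-- ===== PORT B =====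
-- the groupby loop of Source B: take the leading run of equal scores, stop when it would overflow quota
def pyGroupLoop (quota : Int) (count : Int) (result : List (Int × Int)) :
    List (Int × Int) → List (Int × Int)
  | [] => result
  | c :: rest =>
      let group := c :: rest.takeWhile (fun x => x.1 == c.1)
      if quota < count + (group.length : Int) then result
      else pyGroupLoop quota (count + (group.length : Int)) (result ++ group)
        (rest.dropWhile (fun x => x.1 == c.1))
termination_by l => l.length
decreasing_by
  simpa using Nat.lt_succ_of_le (List.length_dropWhile_le _ _)

def select_top_py_alt (candidates : List (Int × Int)) (quota : Int) : List (Int × Int) :=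
  pyGroupLoop quota 0 [] (PySem.List.sorted candidates (fun x => x.1) true)

-- ===== PRECONDITION & SPEC =====
-- Pre_ excludes only inputs where A raises IndexError: a nonempty list with quota < 1 - len,
-- where candidates[quota - 1] is out of range.
def Pre_select_top_py (candidates : List (Int × Int)) (quota : Int) : Prop :=
  candidates = [] ∨ 1 - (candidates.length : Int) ≤ quota
instance (candidates : List (Int × Int)) (quota : Int) : Decidable (Pre_select_top_py candidates quota) := by unfold Pre_select_top_py; infer_instance
def pvWitness_select_top_py : (List (Int × Int)) × Int := ([(1, 2), (3, 4)], 1)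

-- For negative quota on a nonempty list (when fewer than len+quota+1 entries share the maximal
-- score), A's negative indexing and slicing accidentally return a nonempty prefix of the sorted
-- list, while B returns [], the intended result of selecting at most a negative number of winners.
def D_select_top_py (candidates : List (Int × Int)) (quota : Int) : Prop :=
  candidates ≠ [] ∧ quota < 0 ∧
    ((candidates.countP (fun c => c.1 == (candidates.map Prod.fst).max?.getD 0) : Int) ≤ (candidates.length : Int) + quota)
instance (candidates : List (Int × Int)) (quota : Int) : Decidable (D_select_top_py candidates quota) := by unfold D_select_top_py; infer_instance

def Spec_select_top_py (candidates : List (Int × Int)) (quota : Int) (out : List (Int × Int)) : Prop := ¬ D_select_top_py candidates quota → out = select_top_py_alt candidates quota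
instance (candidates : List (Int × Int)) (quota : Int) (out : List (Int × Int)) : Decidable (Spec_select_top_py candidates quota out) := by unfold Spec_select_top_py; infer_instance

def pvDiffWitness_select_top_py : (List (Int × Int)) × Int := ([(3, 1), (2, 2)], -1)
def pvDiffWitnessOut_select_top_py : (List (Int × Int)) × (List (Int × Int)) := ([(3, 1)], [])

-- ===== CLAIM (what is proved, stated in full; the proofs are below) =====
def Claim_unchanged_select_top_py : Prop := ∀ (candidates : List (Int × Int)) (quota : Int), Dom_select_top_py candidates quota → Pre_select_top_py candidates quota → Spec_select_top_py candidates quota (select_top_py candidates quota)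
def Claim_changed_select_top_py : Prop := Dom_select_top_py (pvDiffWitness_select_top_py.1) (pvDiffWitness_select_top_py.2) ∧ Pre_select_top_py (pvDiffWitness_select_top_py.1) (pvDiffWitness_select_top_py.2) ∧ D_select_top_py (pvDiffWitness_select_top_py.1) (pvDiffWitness_select_top_py.2) ∧ select_top_py (pvDiffWitness_select_top_py.1) (pvDiffWitness_select_top_py.2) = pvDiffWitnessOut_select_top_py.1 ∧ select_top_py_alt (pvDiffWitness_select_top_py.1) (pvDiffWitness_select_top_py.2) = pvDiffWitnessOut_select_top_py.2 ∧ pvDiffWitnessOut_select_top_py.1 ≠ pvDiffWitnessOut_select_top_py.2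
def Claim_exact_select_top_py : Prop := ∀ (candidates : List (Int × Int)) (quota : Int), Dom_select_top_py candidates quota → Pre_select_top_py candidates quota → D_select_top_py candidates quota → select_top_py candidates quota ≠ select_top_py_alt candidates quota

-- ===== LEMMAS AND PROOFS =====


-- generic takeWhile/dropWhile facts -------------------------------------------------------------

theorem pv_tw_split {α : Type} (q r : α → Bool) :
    ∀ (l : List α), (∀ x ∈ l.takeWhile q, r x = true) →
      l.takeWhile r = l.takeWhile q ++ (l.dropWhile q).takeWhile r ∧
      l.dropWhile r = (l.dropWhile q).dropWhile r
  | [], _ => by simp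
  | x :: t, h => by
    by_cases hq : q x
    · have hx : r x = true := h x (by simp [List.takeWhile_cons, hq])
      have ih := pv_tw_split q r t (fun y hy => h y (by simp [List.takeWhile_cons, hq, hy]))
      simp [List.takeWhile_cons, List.dropWhile_cons, hq, hx, ih.1, ih.2]
    · simp [List.takeWhile_cons, List.dropWhile_cons, hq]

theorem pv_dropWhile_head {α : Type} (p : α → Bool) :
    ∀ (l : List α) (d : α) (r : List α), l.dropWhile p = d :: r → p d = false
  | [], d, r => by intro h; simp at h
  | x :: t, d, r => by
    intro h
    by_cases hx : p x
    · exact pv_dropWhile_head p t d r (by simpa [List.dropWhile_cons, hx] using h)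
    · rw [List.dropWhile_cons, if_neg (by simp [hx])] at h
      cases h
      simpa using hx

theorem pv_mono {cs : List (Int × Int)} (h : cs.Pairwise (fun a b => b.1 ≤ a.1))
    (i j : Nat) (hi : i < cs.length) (hj : j < cs.length) (hij : i ≤ j) :
    cs[j].1 ≤ cs[i].1 := by
  rcases Nat.lt_or_eq_of_le hij with hlt | heq
  · exact (List.pairwise_iff_getElem.mp h) i j hi hj hlt
  · subst heq; exact le_refl _

theorem pv_filter_eq_takeWhile (v : Int) :
    ∀ (cs : List (Int × Int)), cs.Pairwise (fun a b => b.1 ≤ a.1) →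
      cs.filter (fun c => decide (v < c.1)) = cs.takeWhile (fun c => decide (v < c.1))
  | [], _ => rfl
  | c :: t, h => by
    rw [List.pairwise_cons] at h
    by_cases hc : v < c.1
    · simp [List.filter_cons, List.takeWhile_cons, hc, pv_filter_eq_takeWhile v t h.2]
    · have hall : ∀ x ∈ t, ¬ v < x.1 := fun x hx => by
        have := h.1 x hx; omega
      have hnil : t.filter (fun c => decide (v < c.1)) = [] :=
        List.filter_eq_nil_iff.mpr (fun x hx => by simpa using hall x hx)
      simp [List.filter_cons, List.takeWhile_cons, hc, hnil]

theorem pv_len_tw_le (p : (Int × Int) → Bool) :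
    ∀ (l : List (Int × Int)) (i : Nat) (hi : i < l.length), p l[i] = false →
      (l.takeWhile p).length ≤ i
  | [], i, hi => by simp at hi
  | x :: t, 0, hi => by
    intro h
    simp only [List.getElem_cons_zero] at h
    simp [List.takeWhile_cons, h]
  | x :: t, i + 1, hi => by
    intro h
    by_cases hx : p x
    · simp only [List.getElem_cons_succ] at h
      have := pv_len_tw_le p t i (by simpa using Nat.lt_of_succ_lt_succ hi) h
      simp [List.takeWhile_cons, hx]
      omega
    · simp [List.takeWhile_cons, hx]

theorem pv_len_tw_ge (p : (Int × Int) → Bool) :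
    ∀ (l : List (Int × Int)) (k : Nat) (hk : k ≤ l.length),
      (∀ i (hik : i < k), p (l[i]'(lt_of_lt_of_le hik hk)) = true) →
      k ≤ (l.takeWhile p).length
  | l, 0, hk => by intro _; exact Nat.zero_le _
  | [], k + 1, hk => by simp at hk
  | x :: t, k + 1, hk => by
    intro h
    have hx : p x = true := h 0 (Nat.succ_pos k)
    have ih := pv_len_tw_ge p t k (by simpa using Nat.le_of_succ_le_succ hk)
      (fun i hik => by simpa using h (i + 1) (Nat.succ_lt_succ hik))
    simp [List.takeWhile_cons, hx]
    omega

theorem pv_countP_tw (v : Int) :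
    ∀ (cs : List (Int × Int)), cs.Pairwise (fun a b => b.1 ≤ a.1) →
      (∀ x ∈ cs, x.1 ≤ v) →
      cs.countP (fun x => x.1 == v) = (cs.takeWhile (fun x => x.1 == v)).length
  | [], _, _ => rfl
  | c :: t, h, hle => by
    rw [List.pairwise_cons] at h
    by_cases hc : c.1 = v
    · have := pv_countP_tw v t h.2 (fun x hx => hle x (List.mem_cons_of_mem c hx))
      simp [List.countP_cons, List.takeWhile_cons, hc, this]
    · have hzero : t.countP (fun x => x.1 == v) = 0 := by
        apply List.countP_eq_zero.mpr
        intro x hx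
        have h1 := h.1 x hx
        have h2 := hle c (List.mem_cons_self)
        simp only [beq_iff_eq]
        omega
      simp [List.countP_cons, List.takeWhile_cons, hc, hzero]

-- the groupby loop ------------------------------------------------------------------------------

theorem bloop_nil (quota count : Int) (result : List (Int × Int)) :
    pyGroupLoop quota count result [] = result := by
  rw [pyGroupLoop]

theorem bloop_stop (quota count : Int) (result : List (Int × Int)) (c : Int × Int)
    (rest : List (Int × Int))
    (h : quota < count + 1 + ((rest.takeWhile (fun x => x.1 == c.1)).length : Int)) :
    pyGroupLoop quota count result (c :: rest) = result := by
  rw [pyGroupLoop]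
  rw [if_pos (by simp only [List.length_cons]; push_cast; omega)]

theorem bloop_all :
    ∀ (fuel : Nat) (cs : List (Int × Int)), cs.length ≤ fuel →
      ∀ (quota count : Int) (result : List (Int × Int)),
        count + (cs.length : Int) ≤ quota →
        pyGroupLoop quota count result cs = result ++ cs := by
  intro fuel
  induction fuel with
  | zero =>
    intro cs h quota count result _
    rw [Nat.le_zero, List.length_eq_zero_iff] at h
    subst h
    simp [bloop_nil]
  | succ n ih =>
    intro cs hlen quota count result hle
    cases cs with
    | nil => simp [bloop_nil]
    | cons c rest =>
      have htd : rest.takeWhile (fun x => x.1 == c.1) ++ rest.dropWhile (fun x => x.1 == c.1) = rest :=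
        List.takeWhile_append_dropWhile
      have hlen2 : (rest.takeWhile (fun x => x.1 == c.1)).length +
          (rest.dropWhile (fun x => x.1 == c.1)).length = rest.length := by
        rw [← List.length_append, htd]
      have hle' : count + ((rest.length : Int) + 1) ≤ quota := by
        simp only [List.length_cons] at hle
        push_cast at hle
        omega
      have htwle : (rest.takeWhile (fun x => x.1 == c.1)).length ≤ rest.length :=
        (List.takeWhile_prefix _).length_le
      have hgl : (c :: rest.takeWhile (fun x => x.1 == c.1)).length =
          (rest.takeWhile (fun x => x.1 == c.1)).length + 1 := rfl
      have hcl : (c :: rest).length = rest.length + 1 := rfl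
      have hcond : ¬ quota < count + (((c :: rest.takeWhile (fun x => x.1 == c.1)).length : Nat) : Int) := by
        simp only [List.length_cons]
        push_cast
        omega
      rw [pyGroupLoop, if_neg hcond]
      rw [ih (rest.dropWhile (fun x => x.1 == c.1))
            (by
              have := List.length_dropWhile_le (fun (x : Int × Int) => x.1 == c.1) rest
              simp only [List.length_cons] at hlen
              omega)
            quota _ _
            (by push_cast; omega)]
      rw [List.append_assoc]
      simp [htd]

theorem bloop_prefix :
    ∀ (fuel : Nat) (cs : List (Int × Int)), cs.length ≤ fuel →
      cs.Pairwise (fun a b => b.1 ≤ a.1) →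
      ∀ (p : Int → Bool), (∀ a b : Int, b ≤ a → p b = true → p a = true) →
      ∀ (quota count : Int) (result : List (Int × Int)),
        count + ((cs.takeWhile (fun x => p x.1)).length : Int) ≤ quota →
        (∀ d rest2, cs.dropWhile (fun x => p x.1) = d :: rest2 →
          quota < count + ((cs.takeWhile (fun x => p x.1)).length : Int) + 1 +
            ((rest2.takeWhile (fun x => x.1 == d.1)).length : Int)) →
        pyGroupLoop quota count result cs = result ++ cs.takeWhile (fun x => p x.1) := by
  intro fuel
  induction fuel with
  | zero =>
    intro cs h _ p _ quota count result _ _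
    rw [Nat.le_zero, List.length_eq_zero_iff] at h
    subst h
    simp [bloop_nil]
  | succ n ih =>
    intro cs hlen hpw p hp quota count result h1 h2
    cases cs with
    | nil => simp [bloop_nil]
    | cons c rest =>
      by_cases hpc : p c.1
      · -- head satisfies p: the head run is inside the takeWhile region
        have hsp := pv_tw_split (fun x : Int × Int => x.1 == c.1) (fun x : Int × Int => p x.1)
          (c :: rest)
          (fun x hx => by
            have hxe := List.mem_takeWhile_imp hx
            simp only [beq_iff_eq] at hxe
            show p x.1 = true
            rw [hxe]; exact hpc)
        have hq : ((c :: rest).takeWhile (fun x : Int × Int => x.1 == c.1)) =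
            c :: rest.takeWhile (fun x => x.1 == c.1) := by
          rw [List.takeWhile_cons, if_pos (by simp)]
        have hdq : ((c :: rest).dropWhile (fun x : Int × Int => x.1 == c.1)) =
            rest.dropWhile (fun x => x.1 == c.1) := by
          rw [List.dropWhile_cons, if_pos (by simp)]
        rw [hq, hdq] at hsp
        obtain ⟨hsp1, hsp2⟩ := hsp
        have hlsp : ((c :: rest).takeWhile (fun x : Int × Int => p x.1)).length =
            (rest.takeWhile (fun x => x.1 == c.1)).length + 1 +
            (((rest.dropWhile (fun x => x.1 == c.1)).takeWhile (fun x : Int × Int => p x.1))).length := by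
          rw [hsp1]
          simp only [List.length_cons, List.length_append]
          try omega
        have hpw' : (rest.dropWhile (fun x => x.1 == c.1)).Pairwise
            (fun a b : Int × Int => b.1 ≤ a.1) :=
          (List.pairwise_cons.mp hpw).2.sublist (List.dropWhile_sublist _)
        have hcond : ¬ quota < count + (((c :: rest.takeWhile (fun x => x.1 == c.1)).length : Nat) : Int) := by
          simp only [List.length_cons]
          rw [hlsp] at h1
          push_cast at h1 ⊢
          omega
        rw [pyGroupLoop, if_neg hcond]
        rw [ih (rest.dropWhile (fun x => x.1 == c.1))
              (by
                have := List.length_dropWhile_le (fun (x : Int × Int) => x.1 == c.1) rest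
                simp only [List.length_cons] at hlen
                omega)
              hpw' p hp quota _ _
              (by
                rw [hlsp] at h1
                push_cast at h1 ⊢
                simp only [List.length_cons]
                push_cast
                omega)
              (by
                intro d rest2 hd
                rw [← hsp2] at hd
                have hb := h2 d rest2 hd
                rw [hlsp] at hb
                push_cast at hb ⊢
                simp only [List.length_cons]
                push_cast
                omega)]
        rw [List.append_assoc, hsp1]
      · -- head fails p: the takeWhile region is empty and the first group overflows
        have hpcf : p c.1 = false := by simpa using hpc
        have htw : (c :: rest).takeWhile (fun x : Int × Int => p x.1) = [] := by
          rw [List.takeWhile_cons, if_neg (by simp [hpcf])]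
        have hdw : (c :: rest).dropWhile (fun x : Int × Int => p x.1) = c :: rest := by
          rw [List.dropWhile_cons, if_neg (by simp [hpcf])]
        have hb := h2 c rest hdw
        rw [htw] at hb
        simp only [List.length_nil, Nat.cast_zero, add_zero] at hb
        rw [bloop_stop _ _ _ _ _ (by push_cast at hb ⊢; omega)]
        rw [htw, List.append_nil]


-- instantiations for port B ---------------------------------------------------------------------

theorem pv_alt_sorted (cand : List (Int × Int)) (quota : Int) :
    select_top_py_alt cand quota =
      pyGroupLoop quota 0 [] (PySem.List.sorted cand (fun x => x.1) true) := rfl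

theorem pv_alt_of_le (cand : List (Int × Int)) (quota : Int)
    (h : (cand.length : Int) ≤ quota) :
    select_top_py_alt cand quota = PySem.List.sorted cand (fun x => x.1) true := by
  rw [pv_alt_sorted]
  rw [bloop_all (PySem.List.sorted cand (fun x => x.1) true).length _ le_rfl quota 0 []
      (by rw [PySem.List.length_sorted]; omega)]
  simp

theorem pv_alt_neg (cand : List (Int × Int)) (quota : Int) (h : quota ≤ 0) :
    select_top_py_alt cand quota = [] := by
  rw [pv_alt_sorted]
  cases hcs : PySem.List.sorted cand (fun x => x.1) true with
  | nil => exact bloop_nil _ _ _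
  | cons c rest =>
    exact bloop_stop _ _ _ _ _ (by push_cast; omega)

theorem pv_alt_prefix (cand : List (Int × Int)) (quota : Int) (p : Int → Bool)
    (hp : ∀ a b : Int, b ≤ a → p b = true → p a = true)
    (h1 : ((((PySem.List.sorted cand (fun x => x.1) true).takeWhile (fun x => p x.1)).length : Nat) : Int) ≤ quota)
    (h2 : ∀ d rest2,
      (PySem.List.sorted cand (fun x => x.1) true).dropWhile (fun x => p x.1) = d :: rest2 →
      quota < ((((PySem.List.sorted cand (fun x => x.1) true).takeWhile (fun x => p x.1)).length : Nat) : Int) + 1 +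
        ((rest2.takeWhile (fun x => x.1 == d.1)).length : Int)) :
    select_top_py_alt cand quota =
      (PySem.List.sorted cand (fun x => x.1) true).takeWhile (fun x => p x.1) := by
  rw [pv_alt_sorted]
  rw [bloop_prefix (PySem.List.sorted cand (fun x => x.1) true).length _ le_rfl
      (PySem.List.sorted_pairwise_rev _ _) p hp quota 0 []
      (by omega)
      (by intro d r hd; have := h2 d r hd; omega)]
  simp

-- the A port, unfolded on the interesting branch ------------------------------------------------

theorem pv_A_branch (cand : List (Int × Int)) (quota : Int) (hne : cand ≠ [])
    (hlt : ¬ (((PySem.List.sorted cand (fun x => x.1) true).length : Int) ≤ quota))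
    (cc nc : Int × Int)
    (h1 : PySem.List.pyGet? (PySem.List.sorted cand (fun x => x.1) true) (quota - 1) = some cc)
    (h2 : PySem.List.pyGet? (PySem.List.sorted cand (fun x => x.1) true) quota = some nc) :
    select_top_py cand quota =
      if cc.1 = nc.1 then
        (PySem.List.sorted cand (fun x => x.1) true).filter (fun c => decide (cc.1 < c.1))
      else PySem.List.slice (PySem.List.sorted cand (fun x => x.1) true) none (some quota) := by
  unfold select_top_py
  rw [if_neg hne]
  simp only [h1, h2, if_neg hlt]

-- case lemmas -----------------------------------------------------------------------------------

theorem pv_case_le (cand : List (Int × Int)) (quota : Int)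
    (h : (cand.length : Int) ≤ quota) :
    select_top_py cand quota = select_top_py_alt cand quota := by
  by_cases hne : cand = []
  · subst hne
    rw [pv_alt_of_le [] quota (by simpa using h)]
    unfold select_top_py
    rw [if_pos rfl]
    rw [(PySem.List.sorted_eq_nil_iff _ _ _).mpr rfl]
  · rw [pv_alt_of_le cand quota h]
    unfold select_top_py
    rw [if_neg hne]
    simp only [PySem.List.length_sorted]
    rw [if_pos h]

theorem pv_case_pos (cand : List (Int × Int)) (quota : Int) (hne : cand ≠ [])
    (hq1 : 1 ≤ quota) (hq2 : quota < (cand.length : Int)) :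
    select_top_py cand quota = select_top_py_alt cand quota := by
  have hpw := PySem.List.sorted_pairwise_rev cand (fun x : Int × Int => x.1)
  have hlencs : (PySem.List.sorted cand (fun x : Int × Int => x.1) true).length = cand.length :=
    PySem.List.length_sorted _ _ _
  set cs := PySem.List.sorted cand (fun x : Int × Int => x.1) true with hcsdef
  have hj1lt : (quota - 1 : Int) < (cs.length : Int) := by rw [hlencs]; omega
  have hj2lt : (quota : Int) < (cs.length : Int) := by rw [hlencs]; omega
  have hg1 := PySem.List.pyGet?_eq_some_getElem cs (by omega : (0:Int) ≤ quota - 1) hj1lt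
  have hg2 := PySem.List.pyGet?_eq_some_getElem cs (by omega : (0:Int) ≤ quota) hj2lt
  have hj1n : (quota - 1).toNat < cs.length := by omega
  have hj2n : quota.toNat < cs.length := by omega
  have hjsucc : (quota - 1).toNat + 1 = quota.toNat := by omega
  rw [pv_A_branch cand quota hne (by rw [hlencs]; omega) _ _ hg1 hg2]
  by_cases heq : (cs[(quota - 1).toNat]).1 = (cs[quota.toNat]).1
  · -- tie at the cutoff: both drop the whole straddling group
    rw [if_pos heq]
    have hcut : ∀ i (hi : i < cs.length), i ≤ (quota - 1).toNat →
        (cs[(quota - 1).toNat]).1 ≤ (cs[i]).1 :=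
      fun i hi hile => pv_mono hpw i (quota - 1).toNat hi hj1n hile
    have hlenu : ((cs.takeWhile (fun x => decide ((cs[(quota - 1).toNat]).1 < x.1))).length : Nat)
        ≤ (quota - 1).toNat := by
      apply pv_len_tw_le _ cs (quota - 1).toNat hj1n
      simp
    have h2' : ∀ d rest2,
        cs.dropWhile (fun x => decide ((cs[(quota - 1).toNat]).1 < x.1)) = d :: rest2 →
        quota < ((cs.takeWhile (fun x => decide ((cs[(quota - 1).toNat]).1 < x.1))).length : Int)
          + 1 + ((rest2.takeWhile (fun x => x.1 == d.1)).length : Int) := by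
      intro d rest2 hd
      have hud : cs.takeWhile (fun x => decide ((cs[(quota - 1).toNat]).1 < x.1)) ++ d :: rest2 = cs := by
        rw [← hd]; exact List.takeWhile_append_dropWhile
      set u := cs.takeWhile (fun x => decide ((cs[(quota - 1).toNat]).1 < x.1)) with hu
      have hlensum : u.length + 1 + rest2.length = cs.length := by
        rw [← hud]
        simp only [List.length_append, List.length_cons]
        omega
      have hdge : cs[u.length]? = some d := by
        rw [← hud, List.getElem?_append_right (le_refl u.length)]
        simp
      obtain ⟨hul, hdval⟩ := List.getElem?_eq_some_iff.mp hdge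
      have hdcut : d.1 = (cs[(quota - 1).toNat]).1 := by
        have hfalse := pv_dropWhile_head _ cs d rest2 hd
        simp only [decide_eq_false_iff_not, not_lt] at hfalse
        have hge := hcut u.length hul hlenu
        rw [hdval] at hge
        omega
      have hrun : quota.toNat - u.length ≤ (rest2.takeWhile (fun x => x.1 == d.1)).length := by
        refine pv_len_tw_ge _ rest2 (quota.toNat - u.length) (by omega) ?_
        intro i hik
        have hidx : cs[u.length + 1 + i]? = some (rest2[i]'(by omega)) := by
          rw [← hud, List.getElem?_append_right (by omega)]
          have hsh : u.length + 1 + i - u.length = i + 1 := by omega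
          rw [hsh]
          simp
        obtain ⟨hin, hival⟩ := List.getElem?_eq_some_iff.mp hidx
        have hle1 : (cs[quota.toNat]).1 ≤ (cs[u.length + 1 + i]).1 :=
          pv_mono hpw (u.length + 1 + i) quota.toNat hin hj2n (by omega)
        have hle2 : (cs[u.length + 1 + i]).1 ≤ (cs[u.length]).1 :=
          pv_mono hpw u.length (u.length + 1 + i) hul hin (by omega)
        rw [hival] at hle1 hle2
        rw [hdval] at hle2
        simp only [beq_iff_eq]
        omega
      push_cast
      omega
    have halt := pv_alt_prefix cand quota (fun v => decide ((cs[(quota - 1).toNat]).1 < v))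
      (fun a b hba hb => by simp at hb ⊢; omega)
      (by
        rw [← hcsdef]
        show ((cs.takeWhile (fun x => decide ((cs[(quota - 1).toNat]).1 < x.1))).length : Int) ≤ quota
        omega)
      (by
        intro d rest2 hd0
        rw [← hcsdef] at hd0 ⊢
        show quota < ((cs.takeWhile (fun x => decide ((cs[(quota - 1).toNat]).1 < x.1))).length : Int)
          + 1 + ((rest2.takeWhile (fun x => x.1 == d.1)).length : Int)
        exact h2' d rest2 hd0)
    rw [← hcsdef] at halt
    rw [pv_filter_eq_takeWhile _ cs hpw, halt]
  · -- no tie: both return the first quota elements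
    rw [if_neg heq]
    have hnxtlt : (cs[quota.toNat]).1 < (cs[(quota - 1).toNat]).1 := by
      have := pv_mono hpw (quota - 1).toNat quota.toNat hj1n hj2n (by omega)
      rcases lt_or_eq_of_le this with h | h
      · exact h
      · exact absurd h.symm heq
    have hlenu : ((cs.takeWhile (fun x => decide ((cs[quota.toNat]).1 < x.1))).length : Nat)
        ≤ quota.toNat := by
      apply pv_len_tw_le _ cs quota.toNat hj2n
      simp
    have hlenu2 : quota.toNat ≤ (cs.takeWhile (fun x => decide ((cs[quota.toNat]).1 < x.1))).length := by
      refine pv_len_tw_ge _ cs quota.toNat (by omega) ?_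
      intro i hik
      have := pv_mono hpw i (quota - 1).toNat (by omega) hj1n (by omega)
      simp only [decide_eq_true_eq]
      omega
    have hlenu3 : (cs.takeWhile (fun x => decide ((cs[quota.toNat]).1 < x.1))).length = quota.toNat := by
      omega
    have hutake : cs.takeWhile (fun x => decide ((cs[quota.toNat]).1 < x.1)) = cs.take quota.toNat := by
      have hpre := List.prefix_iff_eq_take.mp
        (List.takeWhile_prefix (fun x : Int × Int => decide ((cs[quota.toNat]).1 < x.1)) (l := cs))
      rw [hlenu3] at hpre
      exact hpre
    have halt := pv_alt_prefix cand quota (fun v => decide ((cs[quota.toNat]).1 < v))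
      (fun a b hba hb => by simp at hb ⊢; omega)
      (by
        rw [← hcsdef]
        show ((cs.takeWhile (fun x => decide ((cs[quota.toNat]).1 < x.1))).length : Int) ≤ quota
        omega)
      (by
        intro d rest2 hd0
        rw [← hcsdef]
        show quota < ((cs.takeWhile (fun x => decide ((cs[quota.toNat]).1 < x.1))).length : Int)
          + 1 + ((rest2.takeWhile (fun x => x.1 == d.1)).length : Int)
        have hnn : (0:Int) ≤ ((rest2.takeWhile (fun x => x.1 == d.1)).length : Int) := by positivity
        omega)
    rw [← hcsdef] at halt
    rw [PySem.List.slice_to cs (by omega : (0:Int) ≤ quota), halt, hutake]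

theorem pv_case_zero (cand : List (Int × Int)) (hne : cand ≠ []) :
    select_top_py cand 0 = select_top_py_alt cand 0 := by
  have hpw := PySem.List.sorted_pairwise_rev cand (fun x : Int × Int => x.1)
  have hlencs : (PySem.List.sorted cand (fun x : Int × Int => x.1) true).length = cand.length :=
    PySem.List.length_sorted _ _ _
  set cs := PySem.List.sorted cand (fun x : Int × Int => x.1) true with hcsdef
  have hcsne : cs ≠ [] := by
    rw [hcsdef, Ne, PySem.List.sorted_eq_nil_iff]; exact hne
  have hn1 : 1 ≤ cs.length := List.length_pos_of_ne_nil hcsne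
  have hg1 : PySem.List.pyGet? cs ((0:Int) - 1) = some (cs[cs.length - 1]'(by omega)) := by
    have hcast : ((0:Int) - 1) = -((1 : Nat) : Int) := by norm_num
    rw [hcast, PySem.List.pyGet?_neg_natCast cs 1 (by omega) (by omega),
      List.getElem?_eq_getElem (by omega)]
  have hg2 : PySem.List.pyGet? cs (0:Int) = some (cs[0]'(by omega)) := by
    rw [PySem.List.pyGet?_zero, List.getElem?_eq_getElem (by omega)]
  rw [pv_alt_neg cand 0 le_rfl]
  rw [pv_A_branch cand 0 hne (by rw [← hcsdef]; push_cast; omega) _ _ hg1 hg2]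
  rw [← hcsdef]
  by_cases heq : (cs[cs.length - 1]'(by omega)).1 = (cs[0]'(by omega)).1
  · rw [if_pos heq]
    apply List.filter_eq_nil_iff.mpr
    intro x hx
    obtain ⟨i, hi, rfl⟩ := List.mem_iff_getElem.mp hx
    have hle := pv_mono hpw 0 i (by omega) hi (by omega)
    simp only [decide_eq_true_eq]
    omega
  · rw [if_neg heq]
    rw [PySem.List.slice_to cs (le_refl (0:Int))]
    simp

theorem pv_case_neg_eq (cand : List (Int × Int)) (quota : Int) (hne : cand ≠ [])
    (hq : quota < 0) (hpre : 1 - (cand.length : Int) ≤ quota)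
    (hcnt : (cand.length : Int) + quota < (cand.countP (fun c => c.1 == (cand.map Prod.fst).max?.getD 0) : Int)) :
    select_top_py cand quota = select_top_py_alt cand quota := by
  have hpw := PySem.List.sorted_pairwise_rev cand (fun x : Int × Int => x.1)
  have hlencs : (PySem.List.sorted cand (fun x : Int × Int => x.1) true).length = cand.length :=
    PySem.List.length_sorted _ _ _
  set cs := PySem.List.sorted cand (fun x : Int × Int => x.1) true with hcsdef
  have hcsne : cs ≠ [] := by
    rw [hcsdef, Ne, PySem.List.sorted_eq_nil_iff]; exact hne
  have hn1 : 1 ≤ cs.length := List.length_pos_of_ne_nil hcsne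
  have hk1eq : quota - 1 = -(((1 - quota).toNat : Nat) : Int) := by omega
  have hk2eq : quota = -((((-quota)).toNat : Nat) : Int) := by omega
  have hj1 : cs.length - (1 - quota).toNat < cs.length := by omega
  have hj2 : cs.length - (-quota).toNat < cs.length := by omega
  have hg1 : PySem.List.pyGet? cs (quota - 1) = some (cs[cs.length - (1 - quota).toNat]'hj1) := by
    rw [hk1eq, PySem.List.pyGet?_neg_natCast cs _ (by omega) (by omega),
      List.getElem?_eq_getElem hj1]
  have hg2' : PySem.List.pyGet? cs quota = cs[cs.length - (-quota).toNat]? := by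
    conv_lhs => rw [hk2eq]
    exact PySem.List.pyGet?_neg_natCast cs _ (by omega) (by omega)
  have hg2 : PySem.List.pyGet? cs quota = some (cs[cs.length - (-quota).toNat]'hj2) := by
    rw [hg2', List.getElem?_eq_getElem hj2]
  -- the maximal score and its facts
  obtain ⟨mv, hmv⟩ : ∃ v, (cand.map Prod.fst).max? = some v := by
    cases hmm : (cand.map Prod.fst).max? with
    | none =>
      rw [List.max?_eq_none_iff] at hmm
      exact absurd (List.map_eq_nil_iff.mp hmm) hne
    | some v => exact ⟨v, rfl⟩
  have hMd : (cand.map Prod.fst).max?.getD 0 = mv := by rw [hmv]; rfl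
  obtain ⟨hmvmem, hmvmax⟩ := List.max?_eq_some_iff.mp hmv
  have hMle : ∀ x ∈ cs, x.1 ≤ (cand.map Prod.fst).max?.getD 0 := fun x hx => by
    rw [hMd]
    exact hmvmax x.1 (List.mem_map_of_mem ((PySem.List.mem_sorted cand (fun y : Int × Int => y.1) true x).mp hx))
  have hcnt2 : cs.countP (fun c => c.1 == (cand.map Prod.fst).max?.getD 0) =
      cand.countP (fun c => c.1 == (cand.map Prod.fst).max?.getD 0) :=
    (PySem.List.sorted_perm cand (fun x : Int × Int => x.1) true).countP_eq _
  have htwc := pv_countP_tw ((cand.map Prod.fst).max?.getD 0) cs hpw hMle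
  have htwlen : cs.length - (-quota).toNat + 1 ≤
      (cs.takeWhile (fun x => x.1 == (cand.map Prod.fst).max?.getD 0)).length := by
    rw [← htwc, hcnt2]
    omega
  have htop : ∀ i (hi : i < cs.length), i ≤ cs.length - (-quota).toNat →
      (cs[i]).1 = (cand.map Prod.fst).max?.getD 0 := by
    intro i hi hij
    have hprefix := List.takeWhile_prefix (fun x : Int × Int => x.1 == (cand.map Prod.fst).max?.getD 0) (l := cs)
    have hitw : i < (cs.takeWhile (fun x => x.1 == (cand.map Prod.fst).max?.getD 0)).length := by omega
    have hgl := hprefix.getElem hitw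
    have hmem := List.getElem_mem hitw
    have := List.mem_takeWhile_imp hmem
    rw [hgl] at this
    simpa using this
  rw [pv_A_branch cand quota hne (by rw [← hcsdef]; push_cast; omega) _ _ hg1 hg2]
  rw [← hcsdef]
  have hcc : (cs[cs.length - (1 - quota).toNat]'hj1).1 = (cs[cs.length - (-quota).toNat]'hj2).1 := by
    rw [htop _ hj1 (by omega), htop _ hj2 (by omega)]
  rw [if_pos hcc]
  rw [pv_alt_neg cand quota (by omega)]
  apply List.filter_eq_nil_iff.mpr
  intro x hx
  have h1 := hMle x hx
  have h2 := htop _ hj1 (by omega)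
  simp only [decide_eq_true_eq]
  omega

theorem pv_case_neg_ne (cand : List (Int × Int)) (quota : Int) (hne : cand ≠ [])
    (hq : quota < 0) (hpre : 1 - (cand.length : Int) ≤ quota)
    (hcnt : (cand.countP (fun c => c.1 == (cand.map Prod.fst).max?.getD 0) : Int) ≤ (cand.length : Int) + quota) :
    select_top_py cand quota ≠ select_top_py_alt cand quota := by
  have hpw := PySem.List.sorted_pairwise_rev cand (fun x : Int × Int => x.1)
  have hlencs : (PySem.List.sorted cand (fun x : Int × Int => x.1) true).length = cand.length :=
    PySem.List.length_sorted _ _ _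
  set cs := PySem.List.sorted cand (fun x : Int × Int => x.1) true with hcsdef
  have hcsne : cs ≠ [] := by
    rw [hcsdef, Ne, PySem.List.sorted_eq_nil_iff]; exact hne
  have hn1 : 1 ≤ cs.length := List.length_pos_of_ne_nil hcsne
  have hk1eq : quota - 1 = -(((1 - quota).toNat : Nat) : Int) := by omega
  have hk2eq : quota = -((((-quota)).toNat : Nat) : Int) := by omega
  have hj1 : cs.length - (1 - quota).toNat < cs.length := by omega
  have hj2 : cs.length - (-quota).toNat < cs.length := by omega
  have hg1 : PySem.List.pyGet? cs (quota - 1) = some (cs[cs.length - (1 - quota).toNat]'hj1) := by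
    rw [hk1eq, PySem.List.pyGet?_neg_natCast cs _ (by omega) (by omega),
      List.getElem?_eq_getElem hj1]
  have hg2' : PySem.List.pyGet? cs quota = cs[cs.length - (-quota).toNat]? := by
    conv_lhs => rw [hk2eq]
    exact PySem.List.pyGet?_neg_natCast cs _ (by omega) (by omega)
  have hg2 : PySem.List.pyGet? cs quota = some (cs[cs.length - (-quota).toNat]'hj2) := by
    rw [hg2', List.getElem?_eq_getElem hj2]
  obtain ⟨mv, hmv⟩ : ∃ v, (cand.map Prod.fst).max? = some v := by
    cases hmm : (cand.map Prod.fst).max? with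
    | none =>
      rw [List.max?_eq_none_iff] at hmm
      exact absurd (List.map_eq_nil_iff.mp hmm) hne
    | some v => exact ⟨v, rfl⟩
  have hMd : (cand.map Prod.fst).max?.getD 0 = mv := by rw [hmv]; rfl
  obtain ⟨hmvmem, hmvmax⟩ := List.max?_eq_some_iff.mp hmv
  have hMle : ∀ x ∈ cs, x.1 ≤ (cand.map Prod.fst).max?.getD 0 := fun x hx => by
    rw [hMd]
    exact hmvmax x.1 (List.mem_map_of_mem ((PySem.List.mem_sorted cand (fun y : Int × Int => y.1) true x).mp hx))
  have hcnt2 : cs.countP (fun c => c.1 == (cand.map Prod.fst).max?.getD 0) =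
      cand.countP (fun c => c.1 == (cand.map Prod.fst).max?.getD 0) :=
    (PySem.List.sorted_perm cand (fun x : Int × Int => x.1) true).countP_eq _
  have htwc := pv_countP_tw ((cand.map Prod.fst).max?.getD 0) cs hpw hMle
  rw [pv_alt_neg cand quota (by omega)]
  rw [pv_A_branch cand quota hne (by rw [← hcsdef]; push_cast; omega) _ _ hg1 hg2]
  rw [← hcsdef]
  by_cases hcc : (cs[cs.length - (1 - quota).toNat]'hj1).1 = (cs[cs.length - (-quota).toNat]'hj2).1
  · rw [if_pos hcc]
    -- the head is strictly above the cutoff, so the filter is nonempty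
    have hheadM : (cs[0]'(by omega)).1 = (cand.map Prod.fst).max?.getD 0 := by
      obtain ⟨c0, hc0mem, hc0v⟩ := List.mem_map.mp hmvmem
      have hc0cs : c0 ∈ cs :=
        (PySem.List.mem_sorted cand (fun x : Int × Int => x.1) true c0).mpr hc0mem
      obtain ⟨i, hi, hmi⟩ := List.mem_iff_getElem.mp hc0cs
      have h1 := hMle (cs[0]'(by omega)) (List.getElem_mem (by omega))
      have h2 := pv_mono hpw 0 i (by omega) hi (by omega)
      rw [hmi, hc0v] at h2
      rw [hMd] at h1 ⊢
      omega
    have hgt : (cs[cs.length - (1 - quota).toNat]'hj1).1 < (cs[0]'(by omega)).1 := by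
      rcases lt_or_eq_of_le (pv_mono hpw 0 (cs.length - (1 - quota).toNat) (by omega) hj1 (by omega))
        with h | h
      · exact h
      · -- all of the top (len+quota)+1 entries would carry the maximal score: contradiction
        exfalso
        have hall : ∀ i (hi : i < cs.length), i ≤ cs.length - (-quota).toNat →
            ((fun x : Int × Int => x.1 == (cand.map Prod.fst).max?.getD 0) (cs[i])) = true := by
          intro i hi hij
          have ha := pv_mono hpw 0 i (by omega) hi (by omega)
          have hb := pv_mono hpw i (cs.length - (-quota).toNat) hi hj2 hij
          simp only [beq_iff_eq]
          rw [← hheadM]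
          have hc : (cs[cs.length - (-quota).toNat]'hj2).1 = (cs[0]'(by omega)).1 := by
            rw [← hcc, ← h]
          omega
        have htw2 : cs.length - (-quota).toNat + 1 ≤
            (cs.takeWhile (fun x => x.1 == (cand.map Prod.fst).max?.getD 0)).length := by
          refine pv_len_tw_ge _ cs (cs.length - (-quota).toNat + 1) (by omega) ?_
          intro i hik
          exact hall i (by omega) (by omega)
        rw [← htwc] at htw2
        rw [hcnt2] at htw2
        omega
    intro hAeq
    have hmem0 : (cs[0]'(by omega)) ∈
        cs.filter (fun c => decide ((cs[cs.length - (1 - quota).toNat]'hj1).1 < c.1)) :=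
      List.mem_filter.mpr ⟨List.getElem_mem (by omega), by simpa using hgt⟩
    rw [hAeq] at hmem0
    simp at hmem0
  · rw [if_neg hcc]
    rw [hk2eq, PySem.List.slice_to_neg_natCast cs ((-quota).toNat) (by omega)]
    intro hAeq
    have := congrArg List.length hAeq
    simp only [List.length_take, List.length_nil] at this
    omega

-- ===== VERDICT (by name: the statement is the Claim_ definition above) =====
theorem select_top_py_spec : Claim_unchanged_select_top_py := by
  intro cand quota _ hpre
  unfold Spec_select_top_py
  intro hnd
  by_cases hne : cand = []
  · subst hne
    have hA : select_top_py [] quota = [] := by unfold select_top_py; rw [if_pos rfl]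
    have hB : select_top_py_alt [] quota = [] := by
      rw [pv_alt_sorted, (PySem.List.sorted_eq_nil_iff _ _ _).mpr rfl, bloop_nil]
    rw [hA, hB]
  · have hpre' : 1 - (cand.length : Int) ≤ quota := hpre.resolve_left hne
    by_cases hle : (cand.length : Int) ≤ quota
    · exact pv_case_le cand quota hle
    · push_neg at hle
      by_cases hq1 : 1 ≤ quota
      · exact pv_case_pos cand quota hne hq1 hle
      · by_cases hq0 : quota = 0
        · subst hq0; exact pv_case_zero cand hne
        · have hqneg : quota < 0 := by omega
          have hcnt : (cand.length : Int) + quota <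
              (cand.countP (fun c => c.1 == (cand.map Prod.fst).max?.getD 0) : Int) := by
            by_contra hc
            push_neg at hc
            exact hnd ⟨hne, hqneg, hc⟩
          exact pv_case_neg_eq cand quota hne hqneg hpre' hcnt
theorem select_top_py_changed : Claim_changed_select_top_py := by
  unfold Claim_changed_select_top_py
  refine ⟨by decide, by decide, by decide, by decide, ?_, by decide⟩
  show select_top_py_alt [(3, 1), (2, 2)] (-1) = []
  rw [select_top_py_alt]
  norm_num [PySem.List.sorted, PySem.List.insertBy]
  rw [pyGroupLoop]
  norm_num
theorem select_top_py_tight : Claim_exact_select_top_py := by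
  intro cand quota _ hpre hd
  unfold D_select_top_py at hd
  obtain ⟨hne, hqneg, hcnt⟩ := hd
  exact pv_case_neg_ne cand quota hne hqneg (hpre.resolve_left hne) hcnt
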